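-- pv_equiv track=rewrite | github.com/u-nivusJO/programmers | etc/방울.py | solution
-- ===== SOURCE A (Python) =====
-- from itertools import accumulate
--
-- def solution(bell):
--     answer=0
--     bell_dict={0:[0]}
--     for i in range(len(bell)):
--         if bell[i]==2:
--             bell[i]=-1
--     bell=list(accumulate(bell))
--     for i, b in enumerate(bell):
--         if b in bell_dict:
--             bell_dict[b].append(i+1)
--         else:
--             bell_dict[b]=[i+1]
--     for v in bell_dict.values():
--         if len(v)>1:
--             answer=max(v[-1]-v[0],answer)
--     return answer
-- ===== SOURCE B (Python) =====
-- def solution(bell):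
--     # Reproduces A's in-place mutation of bell (2 -> -1).
--     for i in range(len(bell)):
--         if bell[i] == 2:
--             bell[i] = -1
--     # Sort-then-scan: (prefix_sum, index) pairs sorted lexicographically bring
--     # equal prefix sums together with ascending indices; one scan over the
--     # contiguous groups keeps the group's first index and a running maximum.
--     pairs = [(0, 0)]
--     s = 0
--     for i, x in enumerate(bell):
--         s += x
--         pairs.append((s, i + 1))
--     pairs.sort()
--     answer = 0
--     group_val, group_first = pairs[0]
--     for v, idx in pairs[1:]:
--         if v != group_val:
--             group_val, group_first = v, idx
--         else:
--             answer = max(answer, idx - group_first)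
--     return answer
-- ===== Notes on version B (the rewrite author's own statement) =====
-- stated objective: alternative
-- what changed: Replaces A's hash-grouping (dict of index lists per prefix sum plus a final scan over dict values) with a sort-then-scan algorithm: build (prefix_sum, index) pairs, sort them lexicographically so equal prefix sums become contiguous with ascending indices, and take one scan over the groups keeping the group's first index and a running maximum; no dictionary at all.
import Mathlib
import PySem

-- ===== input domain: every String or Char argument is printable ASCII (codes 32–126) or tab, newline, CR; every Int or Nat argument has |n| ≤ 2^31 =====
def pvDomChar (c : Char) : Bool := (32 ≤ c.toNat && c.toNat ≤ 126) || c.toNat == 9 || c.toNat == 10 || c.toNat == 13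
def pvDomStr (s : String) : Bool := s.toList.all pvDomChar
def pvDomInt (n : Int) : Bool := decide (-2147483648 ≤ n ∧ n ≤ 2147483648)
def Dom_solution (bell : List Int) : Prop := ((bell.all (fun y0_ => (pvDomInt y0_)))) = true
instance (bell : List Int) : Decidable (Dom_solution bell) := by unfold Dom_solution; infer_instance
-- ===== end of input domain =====

-- B replaces A's hash-grouping (dict of index lists per prefix sum plus a final scan over the
-- dict's values) with sort-then-scan: it sorts (prefix_sum, index) pairs lexicographically and
-- scans the contiguous equal-sum groups once, keeping each group's first index and a running
-- maximum (objective: alternative). Both Pythons mutate bell in place (2 -> -1) identically;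
-- the equivalence proved here is about the RETURN value.

-- ===== PORT A =====
-- itertools.accumulate: running sums (list built left to right)
def pyAccumulate (l : List Int) : List Int :=
  (l.foldl (fun (p : List Int × Int) x => (p.1 ++ [p.2 + x], p.2 + x)) ([], 0)).1

def solution (bell : List Int) : Int :=
  -- for i in range(len(bell)): if bell[i]==2: bell[i]=-1
  -- (i ranges over 0..len-1, so bell[i] never raises and i.toNat is exact)
  let bell1 := (PySem.List.pyRange 0 (bell.length : Int) 1).foldl
    (fun b i => if PySem.List.pyGetD b i 0 = 2 then b.set i.toNat (-1) else b) bell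
  let bell2 := pyAccumulate bell1
  -- for i, b in enumerate(bell): append i+1 to bell_dict[b] (bell_dict[b].append is
  -- d.modify b [] (· ++ [i+1]) given the key is present)
  let d := (PySem.List.enumerate bell2 0).foldl
    (fun (d : PySem.Dict Int (List Int)) p =>
      if d.contains p.2 then d.modify p.2 [] (fun l => l ++ [p.1 + 1])
      else d.insert p.2 [p.1 + 1])
    (PySem.Dict.ofList [(0, [0])])
  -- for v in bell_dict.values(): if len(v)>1: answer=max(v[-1]-v[0],answer)
  d.values.foldl (fun answer v =>
      if 1 < v.length then
        max (PySem.List.pyGetD v (-1) 0 - PySem.List.pyGetD v 0 0) answer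
      else answer) 0

-- ===== PORT B =====
def solution_alt (bell : List Int) : Int :=
  -- for i in range(len(bell)): if bell[i]==2: bell[i]=-1   (same in-place mutation as A)
  let bell1 := (PySem.List.pyRange 0 (bell.length : Int) 1).foldl
    (fun b i => if PySem.List.pyGetD b i 0 = 2 then b.set i.toNat (-1) else b) bell
  -- pairs=[(0,0)]; s=0; for i,x in enumerate(bell): s+=x; pairs.append((s,i+1))
  let pairs := ((PySem.List.enumerate bell1 0).foldl
    (fun (p : List (Int × Int) × Int) q => (p.1 ++ [(p.2 + q.2, q.1 + 1)], p.2 + q.2))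
    ([(0, 0)], 0)).1
  -- pairs.sort()  -- lexicographic on the tuples
  let sp := PySem.List.sorted2 pairs Prod.fst Prod.snd
  -- group_val, group_first = pairs[0]; then the scan over pairs[1:]
  -- (pairs always starts from [(0,0)], so it is never empty: [] is unreachable)
  match sp with
  | [] => 0
  | h :: t =>
    (t.foldl (fun (st : Int × Int × Int) r =>
        if r.1 ≠ st.1 then (r.1, r.2, st.2.2)
        else (st.1, st.2.1, max st.2.2 (r.2 - st.2.1)))
      (h.1, h.2, 0)).2.2

-- ===== PRECONDITION & SPEC =====
def Spec_solution (bell : List Int) (out : Int) : Prop := out = solution_alt bell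
instance (bell : List Int) (out : Int) : Decidable (Spec_solution bell out) := by unfold Spec_solution; infer_instance

-- ===== CLAIM (what is proved, stated in full; the proofs are below) =====
def Claim_equal_solution : Prop := ∀ (bell : List Int), Dom_solution bell → Spec_solution bell (solution bell)

-- ===== LEMMAS AND PROOFS =====

-- the element map 2 ↦ -1 performed by both mutation loops
def fA (x : Int) : Int := if x = 2 then -1 else x

-- running sums starting from s
def aF (s : Int) : List Int → List Int
  | [] => []
  | x :: t => (s + x) :: aF (s + x) t

-- positions (offset j) at which value v occurs
def pos (j v : Int) : List Int → List Int
  | [] => []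
  | x :: t => (if x = v then [j] else []) ++ pos (j + 1) v t

-- first occurrence position of v in q (0 when absent)
def fOcc (q : List Int) (v : Int) : Int := (pos 0 v q).headD 0

-- the common value: max over positions of (position - first occurrence of its value)
def bestOf (q : List Int) : Int :=
  (PySem.List.enumerate q 0).foldl (fun a p => max a (p.1 - fOcc q p.2)) 0

-- ---- basic facts about pos / fOcc ----

theorem pos_ne_nil_iff (v : Int) : ∀ (q : List Int) (j : Int), pos j v q ≠ [] ↔ v ∈ q := by
  intro q
  induction q with
  | nil => intro j; simp [pos]
  | cons x t ih =>
    intro j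
    by_cases hx : x = v
    · simp [pos, hx]
    · simp [pos, hx, ih (j + 1), Ne.symm hx]

theorem pos_lower (v : Int) : ∀ (q : List Int) (j : Int), ∀ i ∈ pos j v q, j ≤ i := by
  intro q
  induction q with
  | nil => intro j i hi; simp [pos] at hi
  | cons x t ih =>
    intro j i hi
    simp only [pos, List.mem_append] at hi
    rcases hi with hi | hi
    · split at hi <;> simp at hi; omega
    · have := ih (j + 1) i hi; omega

theorem pos_pairwise (v : Int) : ∀ (q : List Int) (j : Int), (pos j v q).Pairwise (· < ·) := by
  intro q
  induction q with
  | nil => intro j; simp [pos]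
  | cons x t ih =>
    intro j
    simp only [pos]
    refine List.pairwise_append.mpr ⟨?_, ih (j + 1), ?_⟩
    · split <;> simp
    · intro a ha b hb
      split at ha <;> simp at ha
      have := pos_lower v t (j + 1) b hb
      omega

theorem mem_pos_iff (v i : Int) : ∀ (q : List Int) (j : Int),
    i ∈ pos j v q ↔ (i, v) ∈ PySem.List.enumerate q j := by
  intro q
  induction q with
  | nil => intro j; simp [pos, PySem.List.enumerate]
  | cons x t ih =>
    intro j
    simp only [pos, PySem.List.enumerate, List.mem_append, List.mem_cons, ih (j + 1),
      Prod.mk.injEq]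
    constructor
    · rintro (h | h)
      · split at h <;> simp at h; subst h; tauto
      · tauto
    · rintro (⟨h1, h2⟩ | h)
      · subst h1; subst h2; simp
      · tauto

-- ---- A's mutation loop is map fA ----

theorem take_set (l : List Int) (k : Nat) (v : Int) (h : k < l.length) : (l.set k v).take (k+1) = l.take k ++ [v] := by
  rw [List.set_eq_take_cons_drop v h, List.take_append]
  simp [List.length_take, Nat.min_eq_left (le_of_lt h)]
theorem drop_set (l : List Int) (k : Nat) (v : Int) (h : k < l.length) : (l.set k v).drop (k+1) = l.drop (k+1) := by
  rw [List.set_eq_take_cons_drop v h, List.drop_append]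
  simp [List.length_take, Nat.min_eq_left (le_of_lt h)]

theorem mut_loop : ∀ (m k : Nat) (cs : List Int), cs.length = k + m →
    (PySem.List.pyRange (k : Int) ((k + m : Nat) : Int) 1).foldl
      (fun b i => if PySem.List.pyGetD b i 0 = 2 then b.set i.toNat (-1) else b) cs
    = cs.take k ++ (cs.drop k).map fA := by
  intro m
  induction m with
  | zero =>
    intro k cs hc
    rw [PySem.List.pyRange_one_eq_nil (by exact_mod_cast Nat.le_refl k)]
    have h1 : cs.take k = cs := List.take_of_length_le (by omega)
    have h2 : cs.drop k = [] := by
      have : cs.length ≤ k := by omega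
      simpa using List.drop_of_length_le this
    simp [h1, h2]
  | succ m ih =>
    intro k cs hc
    have hk : k < cs.length := by omega
    rw [PySem.List.pyRange_one_cons (by exact_mod_cast (by omega : k < k + (m+1)))]
    simp only [List.foldl_cons, PySem.List.pyGetD_natCast, Int.toNat_natCast]
    have hstep : ((k : Nat) + (m + 1) : Nat) = ((k+1) + m : Nat) := by omega
    have hcast : ((k:Int) + 1) = (((k+1 : Nat)) : Int) := by push_cast; ring
    by_cases h2 : cs.getD k 0 = 2
    · rw [if_pos h2, hcast]
      rw [List.getD_eq_getElem cs 0 hk] at h2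
      have hlen : (cs.set k (-1)).length = (k+1) + m := by simp; omega
      have hih := ih (k+1) (cs.set k (-1)) hlen
      rw [hstep] at *
      rw [hih, take_set cs k (-1) hk, drop_set cs k (-1) hk, List.drop_eq_getElem_cons hk]
      simp [fA, h2]
    · rw [if_neg h2, hcast]
      rw [List.getD_eq_getElem cs 0 hk] at h2
      have hih := ih (k+1) cs (by omega)
      rw [hstep] at *
      rw [hih]
      have hfix : fA cs[k] = cs[k] := by simp [fA, h2]
      rw [List.take_succ_eq_append_getElem hk, List.drop_eq_getElem_cons hk, List.map_cons, hfix,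
        List.append_assoc, List.singleton_append]

theorem mut_eq (bell : List Int) :
    (PySem.List.pyRange 0 (bell.length : Int) 1).foldl
      (fun b i => if PySem.List.pyGetD b i 0 = 2 then b.set i.toNat (-1) else b) bell
    = bell.map fA := by
  have := mut_loop bell.length 0 bell (by omega)
  simpa using this

-- ---- accumulate ----

theorem accumulate_loop : ∀ (l : List Int) (out : List Int) (s : Int),
    (l.foldl (fun (p : List Int × Int) x => (p.1 ++ [p.2 + x], p.2 + x)) (out, s)).1
    = out ++ aF s l := by
  intro l
  induction l with
  | nil => intro out s; simp [aF]
  | cons x t ih =>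
    intro out s
    simp only [List.foldl_cons, aF, ih]
    simp

theorem pyAccumulate_eq (l : List Int) : pyAccumulate l = aF 0 l := by
  unfold pyAccumulate
  rw [accumulate_loop]
  simp

-- ---- A's dict characterisation ----

theorem pos_enum_one (v : Int) : ∀ (q : List Int) (j : Int),
    ((PySem.List.enumerate q j).filter (fun p => p.2 == v)).map (fun p => p.1 + 1)
    = pos (j + 1) v q := by
  intro q
  induction q with
  | nil => intro j; simp [pos, PySem.List.enumerate]
  | cons x t ih =>
    intro j
    by_cases hx : x = v
    · simp [PySem.List.enumerate, pos, hx, ih (j + 1)]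
    · simp [PySem.List.enumerate, pos, hx, ih (j + 1)]

theorem le_foldl_ifmax {α : Type} (p : α → Prop) [DecidablePred p] (g : α → Int) :
    ∀ (l : List α) (a : Int),
      a ≤ l.foldl (fun ans v => if p v then max (g v) ans else ans) a ∧
      ∀ x ∈ l, p x → g x ≤ l.foldl (fun ans v => if p v then max (g v) ans else ans) a := by
  intro l
  induction l with
  | nil => intro a; simp
  | cons x t ih =>
    intro a
    simp only [List.foldl_cons]
    set a' := if p x then max (g x) a else a with ha'
    have haa' : a ≤ a' := by rw [ha']; split <;> simp
    constructor
    · exact le_trans haa' (ih a').1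
    · intro z hz hp
      rcases List.mem_cons.mp hz with hzx | hzt
      · subst hzx
        have : g z ≤ a' := by rw [ha', if_pos hp]; simp
        exact le_trans this (ih a').1
      · exact (ih a').2 z hzt hp

theorem foldl_ifmax_le {α : Type} (p : α → Prop) [DecidablePred p] (g : α → Int) :
    ∀ (l : List α) (a c : Int), a ≤ c → (∀ x ∈ l, p x → g x ≤ c) →
      l.foldl (fun ans v => if p v then max (g v) ans else ans) a ≤ c := by
  intro l
  induction l with
  | nil => intro a c h _; simpa using h
  | cons x t ih =>
    intro a c ha hg
    simp only [List.foldl_cons]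
    apply ih
    · split
      · exact max_le (hg x (by simp) (by assumption)) ha
      · exact ha
    · intro z hz; exact hg z (by simp [hz])

theorem foldl_max_le_int {α : Type} (g : α → Int) :
    ∀ (l : List α) (a c : Int), a ≤ c → (∀ x ∈ l, g x ≤ c) →
      l.foldl (fun acc y => max acc (g y)) a ≤ c := by
  intro l
  induction l with
  | nil => intro a c h _; simpa using h
  | cons x t ih =>
    intro a c ha hg
    simp only [List.foldl_cons]
    exact ih _ _ (max_le ha (hg x (by simp))) (fun z hz => hg z (by simp [hz]))

theorem pyGetD_zero (l : List Int) (h : l ≠ []) : PySem.List.pyGetD l 0 0 = l.headD 0 := by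
  cases l with
  | nil => simp at h
  | cons x t => simp [PySem.List.pyGetD, PySem.List.pyGet?, PySem.List.pyIdx?]

theorem pyGetD_neg_one (l : List Int) (h : l ≠ []) : PySem.List.pyGetD l (-1) 0 = l.getLastD 0 := by
  have hlen : 0 < l.length := List.length_pos_iff.mpr h
  have h1 : PySem.List.pyIdx? l.length (-1) = some (l.length - 1) := by
    simp [PySem.List.pyIdx?]
    omega
  simp only [PySem.List.pyGetD, PySem.List.pyGet?, h1, Option.bind_some]
  rw [List.getLastD_eq_getLast?, List.getLast?_eq_getElem?]

theorem getLastD_mem (l : List Int) (h : l ≠ []) : l.getLastD 0 ∈ l := by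
  rw [List.getLastD_eq_getLast?, List.getLast?_eq_some_getLast h, Option.getD_some]
  exact List.getLast_mem h

theorem le_getLast_of_pairwise : ∀ (l : List Int), l.Pairwise (· < ·) → ∀ i ∈ l,
    ∀ (h : l ≠ []), i ≤ l.getLast h := by
  intro l
  induction l with
  | nil => intro _ i hi; simp at hi
  | cons x t ih =>
    intro hp i hi h
    rcases List.pairwise_cons.mp hp with ⟨hx, ht⟩
    cases t with
    | nil => simp at hi; simp [hi]
    | cons a s =>
      rw [List.getLast_cons (by simp)]
      rcases List.mem_cons.mp hi with hh | hh
      · subst hh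
        exact le_of_lt (hx _ (List.getLast_mem (by simp)))
      · exact ih ht i hh (by simp)

theorem le_getLastD_of_pairwise (l : List Int) (hp : l.Pairwise (· < ·)) (i : Int)
    (hi : i ∈ l) : i ≤ l.getLastD 0 := by
  have hne : l ≠ [] := List.ne_nil_of_mem hi
  rw [List.getLastD_eq_getLast?, List.getLast?_eq_some_getLast hne, Option.getD_some]
  exact le_getLast_of_pairwise l hp i hi hne

theorem bestOf_nonneg (q : List Int) : 0 ≤ bestOf q :=
  (PySem.List.le_foldl_max_int (PySem.List.enumerate q 0) (fun p => p.1 - fOcc q p.2) 0).1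

theorem A_spec_aux (bell : List Int) :
    solution bell = bestOf (0 :: aF 0 (bell.map fA)) := by
  unfold solution
  simp only [mut_eq, pyAccumulate_eq]
  set acc := aF 0 (bell.map fA) with hacc
  set q : List Int := 0 :: acc with hq
  set L := PySem.List.enumerate acc 0 with hL
  have hstep : L.foldl
      (fun (d : PySem.Dict Int (List Int)) p =>
        if d.contains p.2 then d.modify p.2 [] (fun l => l ++ [p.1 + 1])
        else d.insert p.2 [p.1 + 1]) (PySem.Dict.ofList [(0, [0])])
      = L.foldl
      (fun (d : PySem.Dict Int (List Int)) p => d.modify p.2 [] (fun l => l ++ [p.1 + 1]))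
      (PySem.Dict.ofList [(0, [0])]) := by
    apply PySem.List.foldl_congr_mem
    intro d pr _
    by_cases hc : d.contains pr.2
    · rw [if_pos hc]
    · rw [if_neg hc]
      have hc' : d.contains pr.2 = false := by simpa using hc
      simp [PySem.Dict.modify, PySem.Dict.getD_of_not_contains d [] hc']
  rw [hstep]
  set d := L.foldl
      (fun (d : PySem.Dict Int (List Int)) p => d.modify p.2 [] (fun l => l ++ [p.1 + 1]))
      (PySem.Dict.ofList [(0, [0])]) with hd
  have hkeys : d.keys = PySem.Set.ofList q := by
    rw [hd, PySem.Dict.keys_foldl_modify_key L (fun pr => pr.2) []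
      (fun _ pr => fun l => l ++ [pr.1 + 1])]
    rw [PySem.List.map_snd_enumerate]
    rfl
  have hnodup : d.keys.Nodup := by
    rw [hd]
    apply PySem.Dict.nodup_keys_foldl_modify_key
    simp
  have hgetD : ∀ v, d.getD v [] = pos 0 v q := by
    intro v
    have hswap : (L.map (fun pr : Int × Int => (pr.2, pr.1 + 1))).foldl
        (fun (d : PySem.Dict Int (List Int)) r => d.modify r.1 [] (fun l => l ++ [r.2]))
        (PySem.Dict.ofList [(0, [0])])
        = L.foldl (fun (d : PySem.Dict Int (List Int)) p =>
            d.modify p.2 [] (fun l => l ++ [p.1 + 1])) (PySem.Dict.ofList [(0, [0])]) := by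
      rw [List.foldl_map]
    rw [hd, ← hswap, PySem.Dict.getD_foldl_modify_append]
    have h0 : (PySem.Dict.ofList [((0:Int), ([0]:List Int))]).getD v [] =
        if v = 0 then [0] else [] := by
      have he : PySem.Dict.ofList [((0:Int), ([0]:List Int))]
          = PySem.Dict.empty.insert 0 [0] := rfl
      rw [he, PySem.Dict.getD_insert]
      simp
    rw [h0, List.filter_map, List.map_map]
    have hfm : (List.map ((fun (x : Int × Int) => x.2) ∘ (fun pr : Int × Int => (pr.2, pr.1 + 1)))
        (List.filter ((fun p : Int × Int => p.1 == v) ∘ (fun pr : Int × Int => (pr.2, pr.1 + 1))) L))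
        = pos (0 + 1) v acc := by
      rw [← pos_enum_one v acc 0, hL]
      rfl
    rw [hfm, hq]
    by_cases hv : v = 0
    · subst hv; simp [pos]
    · simp [pos, hv, Ne.symm hv]
  have hvalues : d.values = d.keys.map (fun k => d.getD k []) :=
    PySem.Dict.values_eq_map_keys d hnodup []
  apply le_antisymm
  · apply foldl_ifmax_le (fun v : List Int => 1 < v.length)
      (fun v => PySem.List.pyGetD v (-1) 0 - PySem.List.pyGetD v 0 0)
    · exact bestOf_nonneg q
    · intro x hx hlen
      rcases List.mem_map.mp (hvalues ▸ hx) with ⟨k, hk, hxk⟩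
      have hxpos : x = pos 0 k q := by rw [← hxk, hgetD]
      have hne : x ≠ [] := by
        intro hnil
        rw [hnil] at hlen
        simp at hlen
      rw [pyGetD_neg_one x hne, pyGetD_zero x hne]
      have hhead : x.headD 0 = fOcc q k := by rw [hxpos]; rfl
      have hlast_mem : x.getLastD 0 ∈ pos 0 k q := hxpos ▸ getLastD_mem x hne
      have henum_mem : (x.getLastD 0, k) ∈ PySem.List.enumerate q 0 :=
        (mem_pos_iff k (x.getLastD 0) q 0).mp hlast_mem
      have := (PySem.List.le_foldl_max_int (PySem.List.enumerate q 0)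
        (fun pr => pr.1 - fOcc q pr.2) 0).2 _ henum_mem
      simp only [] at this
      rw [hhead]
      exact this
  · apply foldl_max_le_int (fun pr : Int × Int => pr.1 - fOcc q pr.2)
    · exact (le_foldl_ifmax (fun v : List Int => 1 < v.length)
        (fun v => PySem.List.pyGetD v (-1) 0 - PySem.List.pyGetD v 0 0) d.values 0).1
    · intro pr hpr
      have hi : pr.1 ∈ pos 0 pr.2 q := (mem_pos_iff pr.2 pr.1 q 0).mpr (by
        cases pr; exact hpr)
      have hpos_ne : pos 0 pr.2 q ≠ [] := List.ne_nil_of_mem hi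
      have hhead : (pos 0 pr.2 q).headD 0 = fOcc q pr.2 := rfl
      by_cases hieq : pr.1 = fOcc q pr.2
      · rw [hieq]
        simp only [sub_self]
        exact (le_foldl_ifmax (fun v : List Int => 1 < v.length)
          (fun v => PySem.List.pyGetD v (-1) 0 - PySem.List.pyGetD v 0 0) d.values 0).1
      · have hmemq : pr.2 ∈ q := (pos_ne_nil_iff pr.2 q 0).mp hpos_ne
        have hkmem : pr.2 ∈ d.keys := by rw [hkeys]; exact (PySem.Set.mem_ofList q pr.2).mpr hmemq
        have hxmem : pos 0 pr.2 q ∈ d.values := by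
          rw [hvalues]
          exact List.mem_map.mpr ⟨pr.2, hkmem, hgetD pr.2⟩
        have hlen : 1 < (pos 0 pr.2 q).length := by
          cases hp : pos 0 pr.2 q with
          | nil => exact absurd hp hpos_ne
          | cons a t =>
            have ha : a = fOcc q pr.2 := by rw [← hhead, hp]; rfl
            cases t with
            | nil =>
              rw [hp] at hi
              simp at hi
              exact absurd (hi ▸ ha) hieq
            | cons b u => simp
        have hbound := (le_foldl_ifmax (fun v : List Int => 1 < v.length)
          (fun v => PySem.List.pyGetD v (-1) 0 - PySem.List.pyGetD v 0 0) d.values 0).2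
          _ hxmem hlen
        have hne : pos 0 pr.2 q ≠ [] := hpos_ne
        rw [pyGetD_neg_one _ hne, pyGetD_zero _ hne] at hbound
        have hle_last : pr.1 ≤ (pos 0 pr.2 q).getLastD 0 :=
          le_getLastD_of_pairwise _ (pos_pairwise pr.2 q 0) _ hi
        have hhd : (pos 0 pr.2 q).headD 0 = fOcc q pr.2 := rfl
        rw [hhd] at hbound
        omega

-- ---- B side: the sort ----

-- the lexicographic strict order Python's tuple sort realises on the pairs
def lexlt (p r : Int × Int) : Prop := p.1 < r.1 ∨ (p.1 = r.1 ∧ p.2 < r.2)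

-- the Bool comparison sorted2 uses with keys fst, snd
def bfun (p r : Int × Int) : Bool :=
  decide (p.1 < r.1) || (!decide (r.1 < p.1) && decide (p.2 < r.2))

theorem bfun_iff (p r : Int × Int) : bfun p r = true ↔ lexlt p r := by
  simp [bfun, lexlt]
  omega

theorem lexlt_trans {a b c : Int × Int} (h1 : lexlt a b) (h2 : lexlt b c) : lexlt a c := by
  unfold lexlt at *; omega

theorem lexlt_asymm {a b : Int × Int} (h1 : lexlt a b) (h2 : lexlt b a) : False := by
  unfold lexlt at *; omega

theorem lexlt_total_of_snd_ne {a b : Int × Int} (h : a.2 ≠ b.2) : lexlt a b ∨ lexlt b a := by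
  unfold lexlt; omega

theorem insertBy_perm (x : Int × Int) :
    ∀ l : List (Int × Int), (PySem.List.insertBy bfun x l).Perm (x :: l) := by
  intro l
  induction l with
  | nil => simp [PySem.List.insertBy]
  | cons y ys ih =>
    simp only [PySem.List.insertBy]
    split
    · exact List.Perm.refl _
    · exact ((ih.cons y).trans (List.Perm.swap x y ys))

theorem insertBy_pairwise (x : Int × Int) :
    ∀ l : List (Int × Int), l.Pairwise lexlt → (∀ y ∈ l, x.2 ≠ y.2) →
      (PySem.List.insertBy bfun x l).Pairwise lexlt := by
  intro l
  induction l with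
  | nil => intro _ _; simp [PySem.List.insertBy, List.pairwise_cons]
  | cons y ys ih =>
    intro hp hne
    rcases List.pairwise_cons.mp hp with ⟨hy, hys⟩
    simp only [PySem.List.insertBy]
    split
    · rename_i hb
      have hxy : lexlt x y := (bfun_iff x y).mp hb
      refine List.pairwise_cons.mpr ⟨?_, hp⟩
      intro z hz
      rcases List.mem_cons.mp hz with h | h
      · exact h ▸ hxy
      · exact lexlt_trans hxy (hy z h)
    · rename_i hb
      have hnxy : ¬ lexlt x y := fun h => hb ((bfun_iff x y).mpr h)
      have hyx : lexlt y x := by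
        rcases lexlt_total_of_snd_ne (hne y (by simp)) with h | h
        · exact absurd h hnxy
        · exact h
      refine List.pairwise_cons.mpr ⟨?_, ih hys (fun z hz => hne z (by simp [hz]))⟩
      intro z hz
      rcases List.mem_cons.mp ((insertBy_perm x ys).mem_iff.mp hz) with h | h
      · exact h ▸ hyx
      · exact hy z (by simpa using h)

theorem sortfold : ∀ (xs acc : List (Int × Int)), acc.Pairwise lexlt →
    ((acc ++ xs).map Prod.snd).Nodup →
    (xs.foldl (fun a x => PySem.List.insertBy bfun x a) acc).Perm (acc ++ xs) ∧
    (xs.foldl (fun a x => PySem.List.insertBy bfun x a) acc).Pairwise lexlt := by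
  intro xs
  induction xs with
  | nil => intro acc hp _; exact ⟨by simp, hp⟩
  | cons x t ih =>
    intro acc hp hnd
    simp only [List.foldl_cons]
    have hne : ∀ y ∈ acc, x.2 ≠ y.2 := by
      intro y hy hxy
      have hperm : ((acc ++ x :: t).map Prod.snd).Nodup := hnd
      have : (acc ++ x :: t).map Prod.snd =
          acc.map Prod.snd ++ x.2 :: t.map Prod.snd := by simp
      rw [this] at hperm
      rcases List.nodup_append.mp hperm with ⟨_, _, hdis⟩
      have hyA : x.2 ∈ acc.map Prod.snd := hxy ▸ List.mem_map_of_mem hy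
      exact hdis x.2 hyA x.2 (by simp) rfl
    have hperm1 : (PySem.List.insertBy bfun x acc).Perm (x :: acc) := insertBy_perm x acc
    have hperm2 : ((PySem.List.insertBy bfun x acc) ++ t).Perm (acc ++ x :: t) :=
      (hperm1.append_right t).trans (List.perm_middle.symm)
    have hnd' : (((PySem.List.insertBy bfun x acc) ++ t).map Prod.snd).Nodup :=
      ((hperm2.map Prod.snd).nodup_iff).mpr hnd
    have hih := ih (PySem.List.insertBy bfun x acc) (insertBy_pairwise x acc hp hne) hnd'
    exact ⟨hih.1.trans hperm2, hih.2⟩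

-- sorted2 with keys fst, snd IS the insertBy fold with bfun
theorem sorted2_eq_fold (xs : List (Int × Int)) :
    PySem.List.sorted2 xs Prod.fst Prod.snd
    = xs.foldl (fun a x => PySem.List.insertBy bfun x a) [] := rfl

-- two lexlt-strictly-sorted lists that are permutations of each other are equal
theorem eq_of_perm_of_pairwise_lexlt : ∀ (l1 l2 : List (Int × Int)), l1.Perm l2 →
    l1.Pairwise lexlt → l2.Pairwise lexlt → l1 = l2 := by
  intro l1 l2 hp h1 h2
  refine List.Perm.eq_of_pairwise ?_ h1 h2 hp
  intro a b _ _ hab hba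
  exact absurd hba (fun h => lexlt_asymm hab h)

-- ---- B side: the pairs list ----

theorem pairs_loop : ∀ (t : List Int) (j : Int) (out : List (Int × Int)) (s : Int),
    ((PySem.List.enumerate t j).foldl
      (fun (p : List (Int × Int) × Int) q => (p.1 ++ [(p.2 + q.2, q.1 + 1)], p.2 + q.2))
      (out, s)).1
    = out ++ (PySem.List.enumerate (aF s t) (j + 1)).map (fun p => (p.2, p.1)) := by
  intro t
  induction t with
  | nil => intro j out s; simp [PySem.List.enumerate, aF]
  | cons x ts ih =>
    intro j out s
    simp only [PySem.List.enumerate, aF, List.foldl_cons, List.map_cons, ih (j + 1)]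
    simp [List.append_assoc]

theorem pairs_eq (m : List Int) :
    ((PySem.List.enumerate m 0).foldl
      (fun (p : List (Int × Int) × Int) q => (p.1 ++ [(p.2 + q.2, q.1 + 1)], p.2 + q.2))
      ([(0, 0)], 0)).1
    = (PySem.List.enumerate (0 :: aF 0 m) 0).map (fun p => (p.2, p.1)) := by
  rw [pairs_loop m 0 [(0, 0)] 0]
  simp [PySem.List.enumerate]

-- the swapped enumerate filtered at value v is the positions of v, tagged with v
theorem filter_pairs (v : Int) : ∀ (q : List Int) (j : Int),
    ((PySem.List.enumerate q j).map (fun p => (p.2, p.1))).filter (fun r => r.1 == v)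
    = (pos j v q).map (fun i => (v, i)) := by
  intro q
  induction q with
  | nil => intro j; simp [PySem.List.enumerate, pos]
  | cons x t ih =>
    intro j
    by_cases hx : x = v
    · simp [PySem.List.enumerate, pos, hx, ih (j + 1)]
    · simp [PySem.List.enumerate, pos, hx, ih (j + 1)]

-- ---- B side: the scan over the sorted pairs ----

theorem scan_eq (q : List Int) : ∀ (l : List (Int × Int)) (gv gf ans : Int),
    l.Pairwise lexlt →
    gf = fOcc q gv →
    (∀ r ∈ l, ¬ r.1 < gv) →
    (∀ v, v ≠ gv → (∃ r ∈ l, r.1 = v) →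
      l.filter (fun r => r.1 == v) = (pos 0 v q).map (fun i => (v, i))) →
    0 ≤ ans →
    (l.foldl (fun (st : Int × Int × Int) r =>
        if r.1 ≠ st.1 then (r.1, r.2, st.2.2)
        else (st.1, st.2.1, max st.2.2 (r.2 - st.2.1)))
      (gv, gf, ans)).2.2
    = l.foldl (fun a r => max a (r.2 - fOcc q r.1)) ans := by
  intro l
  induction l with
  | nil => intro gv gf ans _ _ _ _ _; rfl
  | cons r t ih =>
    intro gv gf ans hpw hgf hlo hfil hans
    rcases List.pairwise_cons.mp hpw with ⟨hr, ht⟩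
    simp only [List.foldl_cons]
    by_cases heq : r.1 = gv
    · rw [if_neg (by simp [heq])]
      have : max ans (r.2 - gf) = max ans (r.2 - fOcc q r.1) := by rw [hgf, heq]
      rw [this]
      apply ih gv gf _ ht hgf
      · intro z hz
        have := hr z hz
        unfold lexlt at this
        omega
      · intro v hv hex
        have := hfil v hv (by
          rcases hex with ⟨z, hz, hzv⟩
          exact ⟨z, by simp [hz], hzv⟩)
        rwa [List.filter_cons, if_neg (by simp only [beq_iff_eq, heq]; omega)] at this
      · exact le_trans hans (le_max_left _ _)
    · rw [if_pos (by simp [heq])]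
      -- the head opens a new group: its index is the first occurrence of its value
      have hfr := hfil r.1 heq ⟨r, by simp, rfl⟩
      have hhd : r.2 = fOcc q r.1 := by
        rw [List.filter_cons, if_pos (by simp)] at hfr
        cases hp : pos 0 r.1 q with
        | nil => rw [hp] at hfr; simp at hfr
        | cons a u =>
          rw [hp] at hfr
          simp only [List.map_cons] at hfr
          have : r = (r.1, a) := by
            have := List.head_eq_of_cons_eq hfr
            exact this
          simp [fOcc, hp]
          exact (Prod.mk.injEq _ _ _ _ ▸ this).2
      have hgvlt : gv < r.1 := by
        have := hlo r (by simp)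
        omega
      have hstep : max ans (r.2 - fOcc q r.1) = ans := by
        rw [← hhd]
        simp [hans]
      rw [hstep]
      apply ih r.1 r.2 ans ht hhd
      · intro z hz
        have := hr z hz
        unfold lexlt at this
        omega
      · intro v hv hex
        have hvgv : v ≠ gv := by
          rcases hex with ⟨z, hz, hzv⟩
          have := hr z hz
          unfold lexlt at this
          omega
        have := hfil v hvgv (by
          rcases hex with ⟨z, hz, hzv⟩
          exact ⟨z, by simp [hz], hzv⟩)
        rwa [List.filter_cons, if_neg (by simp only [beq_iff_eq]; omega)] at this
      · exact hans

theorem B_spec_aux (bell : List Int) :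
    solution_alt bell = bestOf (0 :: aF 0 (bell.map fA)) := by
  unfold solution_alt
  simp only [mut_eq, pairs_eq]
  set q : List Int := 0 :: aF 0 (bell.map fA) with hq
  set pairs : List (Int × Int) := (PySem.List.enumerate q 0).map (fun p => (p.2, p.1))
    with hpairs
  have hnd : (pairs.map Prod.snd).Nodup := by
    rw [hpairs, List.map_map]
    have : ((fun p : Int × Int => p.2) ∘ (fun p : Int × Int => (p.2, p.1)))
        = Prod.fst := rfl
    rw [this]
    have hpl : ((PySem.List.enumerate q 0).map Prod.fst).Pairwise
        ((· < ·) : Int → Int → Prop) :=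
      List.Pairwise.map _ (fun _ _ h => h) (PySem.List.pairwise_lt_enumerate q 0)
    exact hpl.imp (fun h => ne_of_lt h)
  have hsf := sortfold pairs [] (by simp) (by simpa using hnd)
  rw [sorted2_eq_fold]
  set sp := pairs.foldl (fun a x => PySem.List.insertBy bfun x a) [] with hsp
  have hperm : sp.Perm pairs := by simpa using hsf.1
  have hpw : sp.Pairwise lexlt := hsf.2
  -- characterise the per-value slices of sp
  have hfil : ∀ v, sp.filter (fun r => r.1 == v) = (pos 0 v q).map (fun i => (v, i)) := by
    intro v
    apply eq_of_perm_of_pairwise_lexlt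
    · exact (hperm.filter _).trans (by rw [hpairs, filter_pairs])
    · exact hpw.filter _
    · refine List.Pairwise.map _ ?_ (pos_pairwise v q 0)
      intro a b hab
      exact Or.inr ⟨rfl, hab⟩
  -- sp is nonempty: pairs contains (0, 0)
  have hmem00 : ((0 : Int), (0 : Int)) ∈ sp := by
    rw [hperm.mem_iff, hpairs, hq]
    exact List.mem_map.mpr ⟨(0, 0), by simp [PySem.List.enumerate], rfl⟩
  cases hspl : sp with
  | nil => rw [hspl] at hmem00; simp at hmem00
  | cons h t =>
    rw [hspl] at hpw hperm hfil hmem00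
    rcases List.pairwise_cons.mp hpw with ⟨hhd, hpt⟩
    -- the head is the first element of its group: its index is fOcc q h.1
    have hh2 : h.2 = fOcc q h.1 := by
      have := hfil h.1
      rw [List.filter_cons, if_pos (by simp)] at this
      cases hp : pos 0 h.1 q with
      | nil => rw [hp] at this; simp at this
      | cons a u =>
        rw [hp] at this
        simp only [List.map_cons] at this
        have heq := List.head_eq_of_cons_eq this
        simp [fOcc, hp]
        exact (Prod.mk.injEq _ _ _ _ ▸ heq).2
    have hscan := scan_eq q t h.1 h.2 0 hpt hh2
      (by
        intro z hz
        have := hhd z hz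
        unfold lexlt at this
        omega)
      (by
        intro v hv _
        have := hfil v
        rwa [List.filter_cons, if_neg (by simp only [beq_iff_eq]; omega)] at this)
      le_rfl
    show (t.foldl (fun (st : Int × Int × Int) r =>
        if r.1 ≠ st.1 then (r.1, r.2, st.2.2)
        else (st.1, st.2.1, max st.2.2 (r.2 - st.2.1)))
      (h.1, h.2, 0)).2.2 = bestOf q
    rw [hscan]
    -- bestOf q is the same fold over pairs, hence over sp = h :: t
    have hbest : bestOf q = pairs.foldl (fun a r => max a (r.2 - fOcc q r.1)) 0 := by
      rw [hpairs, List.foldl_map]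
      rfl
    haveI : RightCommutative (fun (a : Int) (r : Int × Int) => max a (r.2 - fOcc q r.1)) :=
      ⟨by intro b a a'; simp [max_assoc, max_comm (a.2 - fOcc q a.1)]⟩
    rw [hbest, ← List.Perm.foldl_eq hperm 0, List.foldl_cons, hh2]
    simp

-- ===== VERDICT (by name: the statement is the Claim_ definition above) =====
theorem solution_spec : Claim_equal_solution := by
  intro bell _
  unfold Spec_solution
  rw [A_spec_aux, B_spec_aux]
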